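-- pv_equiv track=rewrite | github.com/looopTools/advent_of_Code_2023 | python/2/main.py | get_minimal_viable_number_of_dice
-- ===== SOURCE A (Python) =====
-- def get_minimal_viable_number_of_dice(game: list[dict[str, int]]) -> int:
--
--     red = 0
--     green = 0
--     blue = 0
--
--     for draw in game:
--         for color, value in draw.items():
--             if color == 'red' and red < value:
--                 red = value
--             if color == 'green' and green < value:
--                 green = value
--             if color == 'blue' and blue < value:
--                 blue = value
--
--     return red * green * blue
-- ===== SOURCE B (Python) =====
-- def get_minimal_viable_number_of_dice(game: list[dict[str, int]]) -> int:
--     # Per-color maxima in independent passes, clamped below by 0, then the product.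
--     red = max([0] + [draw['red'] for draw in game if 'red' in draw])
--     green = max([0] + [draw['green'] for draw in game if 'green' in draw])
--     blue = max([0] + [draw['blue'] for draw in game if 'blue' in draw])
--     return red * green * blue
-- ===== Notes on version B (the rewrite author's own statement) =====
-- stated objective: simpler
-- what changed: Replaces the fused loop updating three accumulators over every (color,value) item with three independent per-color extraction passes (dict lookup per draw, max folded with 0) multiplied at the end.
import Mathlib
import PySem

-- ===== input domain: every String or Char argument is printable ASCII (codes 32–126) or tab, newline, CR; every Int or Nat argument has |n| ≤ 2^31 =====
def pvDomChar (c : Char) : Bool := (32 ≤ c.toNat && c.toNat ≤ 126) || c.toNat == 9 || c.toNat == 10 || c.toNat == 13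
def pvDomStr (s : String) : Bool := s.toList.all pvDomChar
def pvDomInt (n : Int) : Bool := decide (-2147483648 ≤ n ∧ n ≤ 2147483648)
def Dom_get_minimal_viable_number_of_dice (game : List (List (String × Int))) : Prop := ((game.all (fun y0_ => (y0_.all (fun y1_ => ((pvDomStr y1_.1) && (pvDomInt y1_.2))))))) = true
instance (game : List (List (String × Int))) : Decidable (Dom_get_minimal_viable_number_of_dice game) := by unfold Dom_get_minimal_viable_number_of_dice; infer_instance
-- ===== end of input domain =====

-- B replaces A's single fused loop over all (color, value) items (three running accumulators)
-- with three independent per-color passes (dict lookup per draw, max folded with 0), same cost.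

-- ===== PORT A =====
-- one item step of A's inner loop: the three independent 'if' updates, in order
def pvStepA (s : Int × Int × Int) (p : String × Int) : Int × Int × Int :=
  let r := if p.1 == "red"   && decide (s.1 < p.2)   then p.2 else s.1
  let g := if p.1 == "green" && decide (s.2.1 < p.2) then p.2 else s.2.1
  let b := if p.1 == "blue"  && decide (s.2.2 < p.2) then p.2 else s.2.2
  (r, g, b)

def get_minimal_viable_number_of_dice (game : List (List (String × Int))) : Int :=
  let s := game.foldl (fun s draw => draw.foldl pvStepA s) (0, 0, 0)
  s.1 * s.2.1 * s.2.2

-- ===== PORT B =====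
-- max([0] + [draw[c] for draw in game if c in draw]); draw[c] on a dict is first-match
-- lookup on the association list (exact: under Pre_ each draw has unique keys)
def pvColorMax (game : List (List (String × Int))) (c : String) : Int :=
  (PySem.List.max? ((0 : Int) :: game.filterMap (fun draw => PySem.Dict.get? (PySem.Dict.mk draw) c)) (fun y => y)).getD 0

def get_minimal_viable_number_of_dice_alt (game : List (List (String × Int))) : Int :=
  let red := pvColorMax game "red"
  let green := pvColorMax game "green"
  let blue := pvColorMax game "blue"
  red * green * blue

-- ===== PRECONDITION & SPEC =====
-- Pre_ excludes association lists with duplicate keys inside a draw: a Python dict cannot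
-- have duplicate keys, so such lists do not represent any input of the Python programs.
def Pre_get_minimal_viable_number_of_dice (game : List (List (String × Int))) : Prop :=
  ∀ d ∈ game, (d.map Prod.fst).Nodup
instance (game : List (List (String × Int))) : Decidable (Pre_get_minimal_viable_number_of_dice game) := by unfold Pre_get_minimal_viable_number_of_dice; infer_instance

def pvWitness_get_minimal_viable_number_of_dice : (List (List (String × Int))) :=
  [[("red", 4), ("blue", 2)], [("green", 3), ("red", 1)]]

def Spec_get_minimal_viable_number_of_dice (game : List (List (String × Int))) (out : Int) : Prop := out = get_minimal_viable_number_of_dice_alt game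
instance (game : List (List (String × Int))) (out : Int) : Decidable (Spec_get_minimal_viable_number_of_dice game out) := by unfold Spec_get_minimal_viable_number_of_dice; infer_instance

-- ===== CLAIM (what is proved, stated in full; the proofs are below) =====
def Claim_equal_get_minimal_viable_number_of_dice : Prop := ∀ (game : List (List (String × Int))), Dom_get_minimal_viable_number_of_dice game → Pre_get_minimal_viable_number_of_dice game → Spec_get_minimal_viable_number_of_dice game (get_minimal_viable_number_of_dice game)

-- ===== LEMMAS AND PROOFS =====

-- A's per-item update for a single color
def pvFmax (c : String) (a : Int) (p : String × Int) : Int :=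
  if p.1 == c && decide (a < p.2) then p.2 else a

theorem pvFmax_eq (c : String) (a : Int) (p : String × Int) :
    pvFmax c a p = if p.1 == c then max a p.2 else a := by
  unfold pvFmax
  by_cases h : (p.1 == c) = true <;> simp [h, max_def] <;> (split <;> omega)

-- the fused step splits into the three per-color updates
theorem pvStepA_split (s : Int × Int × Int) (p : String × Int) :
    pvStepA s p = (pvFmax "red" s.1 p, pvFmax "green" s.2.1 p, pvFmax "blue" s.2.2 p) := rfl

theorem foldl_stepA_split (L : List (String × Int)) (r g b : Int) :
    L.foldl pvStepA (r, g, b) =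
      (L.foldl (pvFmax "red") r, L.foldl (pvFmax "green") g, L.foldl (pvFmax "blue") b) := by
  induction L generalizing r g b with
  | nil => rfl
  | cons p t ih => simp [List.foldl, pvStepA_split, ih]

theorem foldl_game_split (game : List (List (String × Int))) (r g b : Int) :
    game.foldl (fun s draw => draw.foldl pvStepA s) (r, g, b) =
      (game.foldl (fun a d => d.foldl (pvFmax "red") a) r,
       game.foldl (fun a d => d.foldl (pvFmax "green") a) g,
       game.foldl (fun a d => d.foldl (pvFmax "blue") a) b) := by
  induction game generalizing r g b with
  | nil => rfl
  | cons d t ih => simp [List.foldl, foldl_stepA_split, ih]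

-- keys other than c leave the accumulator unchanged
theorem foldl_fmax_of_absent (c : String) (t : List (String × Int)) (a : Int)
    (h : ∀ q ∈ t, q.1 ≠ c) : t.foldl (pvFmax c) a = a := by
  induction t generalizing a with
  | nil => rfl
  | cons q u ih =>
    have hq : ¬ (q.1 == c) = true := by
      simpa using h q List.mem_cons_self
    rw [List.foldl_cons, pvFmax_eq, if_neg hq]
    exact ih a (fun q' hq' => h q' (List.mem_cons_of_mem _ hq'))

-- one draw with unique keys: A's per-color fold is a single max with the dict lookup
theorem foldl_fmax_draw (c : String) (d : List (String × Int)) (a : Int)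
    (hnd : (d.map Prod.fst).Nodup) :
    d.foldl (pvFmax c) a =
      match PySem.Dict.get? (PySem.Dict.mk d) c with
      | some v => max a v
      | none => a := by
  induction d generalizing a with
  | nil => rfl
  | cons p t ih =>
    simp only [List.map_cons, List.nodup_cons] at hnd
    rw [List.foldl_cons, PySem.Dict.get?_mk_cons, pvFmax_eq]
    by_cases h : (p.1 == c) = true
    · have hc : p.1 = c := by simpa using h
      have habs : ∀ q ∈ t, q.1 ≠ c := by
        intro q hq hqc
        exact hnd.1 (hc ▸ hqc ▸ List.mem_map_of_mem hq)
      simp [h, foldl_fmax_of_absent c t _ habs]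
    · rw [if_neg h, if_neg h]
      exact ih a hnd.2

-- the whole game: A's per-color fold equals the running max over B's extracted values
theorem foldl_fmax_game (c : String) (game : List (List (String × Int))) (a : Int)
    (hpre : ∀ d ∈ game, (d.map Prod.fst).Nodup) :
    game.foldl (fun a d => d.foldl (pvFmax c) a) a =
      (game.filterMap (fun draw => PySem.Dict.get? (PySem.Dict.mk draw) c)).foldl max a := by
  induction game generalizing a with
  | nil => rfl
  | cons d t ih =>
    rw [List.foldl_cons, List.filterMap_cons,
        foldl_fmax_draw c d a (hpre d (List.mem_cons_self))]
    cases PySem.Dict.get? (PySem.Dict.mk d) c with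
    | none => exact ih a (fun d' hd' => hpre d' (List.mem_cons_of_mem _ hd'))
    | some v => exact ih (max a v) (fun d' hd' => hpre d' (List.mem_cons_of_mem _ hd'))

theorem pvColorMax_eq (game : List (List (String × Int))) (c : String) :
    pvColorMax game c =
      (game.filterMap (fun draw => PySem.Dict.get? (PySem.Dict.mk draw) c)).foldl max 0 := by
  unfold pvColorMax
  rw [PySem.List.max?_id_cons]
  rfl

-- ===== VERDICT (by name: the statement is the Claim_ definition above) =====
theorem get_minimal_viable_number_of_dice_spec : Claim_equal_get_minimal_viable_number_of_dice := by
  intro game _ hpre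
  unfold Spec_get_minimal_viable_number_of_dice
  unfold get_minimal_viable_number_of_dice get_minimal_viable_number_of_dice_alt
  rw [foldl_game_split, pvColorMax_eq, pvColorMax_eq, pvColorMax_eq,
      foldl_fmax_game _ _ _ hpre, foldl_fmax_game _ _ _ hpre, foldl_fmax_game _ _ _ hpre]
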